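-- pv_equiv track=rewrite | github.com/thealexhoar/pymodoro | main.py | get_contiguous_number
-- ===== SOURCE A (Python) =====
-- def get_contiguous_number(string, index):
--     length = len(string)
--     end = length
--     while end > index:
--         substring = string[index:end]
--         if substring.isdigit():
--             return substring
--         end -= 1
--
--     return ''
-- ===== SOURCE B (Python) =====
-- def get_contiguous_number(string, index):
--     n = len(string)
--     start = index if index >= 0 else max(0, n + index)
--     digits = []
--     for ch in string[start:]:
--         if not ch.isdigit():
--             break
--         digits.append(ch)
--     return ''.join(digits)
-- ===== Notes on version B (the rewrite author's own statement) =====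
-- stated objective: faster
-- what changed: A shrinks the window end back-to-front and re-scans the whole slice with .isdigit() each step; B does one forward pass from the (normalized) start index, collecting digit characters and stopping at the first non-digit.
import Mathlib
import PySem

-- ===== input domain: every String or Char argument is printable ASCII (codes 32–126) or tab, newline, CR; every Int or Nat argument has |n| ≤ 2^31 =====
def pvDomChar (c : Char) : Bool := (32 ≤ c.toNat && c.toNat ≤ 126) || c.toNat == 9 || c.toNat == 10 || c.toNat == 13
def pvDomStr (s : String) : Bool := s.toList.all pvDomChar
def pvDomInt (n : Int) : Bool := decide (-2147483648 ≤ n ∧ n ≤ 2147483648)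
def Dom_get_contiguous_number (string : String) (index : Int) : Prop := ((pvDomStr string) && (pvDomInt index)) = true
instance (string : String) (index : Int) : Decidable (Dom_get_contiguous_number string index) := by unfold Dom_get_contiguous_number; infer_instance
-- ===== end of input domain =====

-- B replaces A's back-to-front shrinking-window rescan with a single forward
-- digit-collecting pass from the normalized start index.


-- ===== PORT A =====
-- the 'while end > index' loop; fuel = (end - index).toNat at every call
def pvALoop (string : String) (index : Int) : Nat → Int → String
  | 0, _ => ""
  | fuel+1, e =>
    if e > index then
      let substring := PySem.Str.slice string (some index) (some e)
      if PySem.Str.strIsdigit substring then substring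
      else pvALoop string index fuel (e-1)
    else ""

def get_contiguous_number (string : String) (index : Int) : String :=
  let length := PySem.Str.len string
  pvALoop string index (length - index).toNat length

-- ===== PORT B =====
-- the 'for ch in string[start:]' loop with accumulator and break
def pvBLoop (digits : List Char) : List Char → List Char
  | [] => digits
  | c :: rest => if PySem.Chars.isdigit c then pvBLoop (digits ++ [c]) rest else digits

def get_contiguous_number_alt (string : String) (index : Int) : String :=
  let n := PySem.Str.len string
  let start := if 0 ≤ index then index else max 0 (n + index)
  String.ofList (pvBLoop [] (PySem.Str.slice string (some start) none).toList)

-- ===== PRECONDITION & SPEC =====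
def Spec_get_contiguous_number (string : String) (index : Int) (out : String) : Prop := out = get_contiguous_number_alt string index
instance (string : String) (index : Int) (out : String) : Decidable (Spec_get_contiguous_number string index out) := by unfold Spec_get_contiguous_number; infer_instance

-- ===== CLAIM (what is proved, stated in full; the proofs are below) =====
def Claim_equal_get_contiguous_number : Prop := ∀ (string : String) (index : Int), Dom_get_contiguous_number string index → Spec_get_contiguous_number string index (get_contiguous_number string index)

-- ===== LEMMAS AND PROOFS =====

theorem pv_clampIdx_pred (n : Nat) (e : Int) :
    PySem.List.clampIdx n e ≤ PySem.List.clampIdx n (e-1) + 1 := by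
  unfold PySem.List.clampIdx; split_ifs <;> omega

theorem pv_clampIdx_succ (n : Nat) (i : Int) :
    PySem.List.clampIdx n (i+1) ≤ PySem.List.clampIdx n i + 1 := by
  unfold PySem.List.clampIdx; split_ifs <;> omega

theorem pv_clampIdx_le (n : Nat) (i : Int) : PySem.List.clampIdx n i ≤ n := by
  unfold PySem.List.clampIdx; split_ifs <;> omega

theorem pv_clampIdx_natCast (n : Nat) : PySem.List.clampIdx n (n : Int) = n := by
  unfold PySem.List.clampIdx; split_ifs <;> omega

theorem pv_clampIdx_of_ge (n : Nat) (i : Int) (h : (n:Int) ≤ i) : PySem.List.clampIdx n i = n := by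
  unfold PySem.List.clampIdx; split_ifs <;> omega

-- Python's str.isdigit on a rendered character list
theorem pv_strIsdigit_iff (l : List Char) :
    PySem.Str.strIsdigit (String.ofList l) = true ↔ l ≠ [] ∧ l.all PySem.Chars.isdigit = true := by
  simp [PySem.Str.strIsdigit, PySem.Chars.strIsdigit]

-- a prefix of t is all-p exactly when it fits inside the leading p-run
theorem pv_all_take_iff (p : Char → Bool) (t : List Char) (m : Nat) :
    ((t.take m).all p = true) ↔ min m t.length ≤ (t.takeWhile p).length := by
  induction t generalizing m with
  | nil => simp
  | cons c rest ih =>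
    cases m with
    | zero => simp
    | succ m =>
      by_cases hc : p c
      · simp [hc, ih]
      · simp [hc]

theorem pv_take_takeWhile (p : Char → Bool) (t : List Char) :
    t.take (t.takeWhile p).length = t.takeWhile p := by
  induction t with
  | nil => simp
  | cons c rest ih =>
    by_cases hc : p c
    · simp [hc, ih]
    · simp [hc]

-- B's accumulator loop is takeWhile
theorem pvBLoop_eq (l acc : List Char) :
    pvBLoop acc l = acc ++ l.takeWhile PySem.Chars.isdigit := by
  induction l generalizing acc with
  | nil => simp [pvBLoop]
  | cons c rest ih =>
    by_cases hc : PySem.Chars.isdigit c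
    · simp [pvBLoop, hc, ih]
    · simp [pvBLoop, hc]

-- the substring string[index:e] as drop/take on the character list
theorem pv_slice_eq (string : String) (index e : Int) :
    (PySem.Str.slice string (some index) (some e)) =
      String.ofList (((string.toList).drop (PySem.List.clampIdx string.toList.length index)).take
        (PySem.List.clampIdx string.toList.length e - PySem.List.clampIdx string.toList.length index)) := by
  simp [PySem.Str.slice, PySem.List.slice]

-- A's loop when the digit-run at the start position is empty: every substring fails .isdigit()
theorem pvALoop_empty (string : String) (index : Int)
    (hk : (((string.toList).drop (PySem.List.clampIdx string.toList.length index)).takeWhile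
            PySem.Chars.isdigit).length = 0) :
    ∀ (fuel : Nat) (e : Int), pvALoop string index fuel e = "" := by
  intro fuel
  induction fuel with
  | zero => intro e; rfl
  | succ f ih =>
    intro e
    have hne : ∀ m : Nat, ¬ (PySem.Str.strIsdigit (String.ofList
        (((string.toList).drop (PySem.List.clampIdx string.toList.length index)).take m)) = true) := by
      intro m
      rw [pv_strIsdigit_iff]
      rintro ⟨hnil, hall⟩
      rw [pv_all_take_iff, hk, Nat.le_zero] at hall
      rcases Nat.min_eq_zero_iff.mp hall with h | h
      · exact hnil (by simp [h])
      · exact hnil (List.take_eq_nil_iff.mpr (Or.inr (List.eq_nil_iff_length_eq_zero.mpr h)))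
    unfold pvALoop
    split
    · rw [pv_slice_eq, if_neg (hne _)]
      exact ih (e-1)
    · rfl

-- A's loop when the digit-run is nonempty: while the window still covers the run,
-- the loop shrinks the end until it returns exactly the run
theorem pvALoop_run (string : String) (index : Int)
    (hk : 1 ≤ (((string.toList).drop (PySem.List.clampIdx string.toList.length index)).takeWhile
            PySem.Chars.isdigit).length) :
    ∀ (fuel : Nat) (e : Int), fuel = (e - index).toNat → index < e →
      PySem.List.clampIdx string.toList.length index +
        (((string.toList).drop (PySem.List.clampIdx string.toList.length index)).takeWhile
            PySem.Chars.isdigit).length ≤ PySem.List.clampIdx string.toList.length e →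
      pvALoop string index fuel e =
        String.ofList (((string.toList).drop (PySem.List.clampIdx string.toList.length index)).takeWhile
            PySem.Chars.isdigit) := by
  intro fuel
  induction fuel with
  | zero => intro e hfuel hgt _; omega
  | succ f ih =>
    intro e hfuel hgt hcov
    unfold pvALoop
    rw [if_pos hgt, pv_slice_eq]
    set cs := string.toList with hcs
    set s := PySem.List.clampIdx cs.length index with hs
    set w := PySem.List.clampIdx cs.length e with hw
    set t := cs.drop s with ht
    set k := (t.takeWhile PySem.Chars.isdigit).length with hkdef
    have hkt : k ≤ t.length := (List.takeWhile_prefix _).length_le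
    by_cases hc : min (w - s) t.length ≤ k
    · have hdig : PySem.Str.strIsdigit (String.ofList (t.take (w - s))) = true := by
        rw [pv_strIsdigit_iff]
        refine ⟨?_, by rw [pv_all_take_iff]; exact hc⟩
        intro hnil
        rcases List.take_eq_nil_iff.mp hnil with h | h
        · omega
        · rw [h] at hkt; simp at hkt; omega
      rw [if_pos hdig]
      congr 1
      by_cases hml : t.length ≤ w - s
      · rw [List.take_of_length_le hml]
        exact ((List.takeWhile_prefix _).eq_of_length (by omega)).symm
      · have hm : w - s = k := by omega
        rw [hm, hkdef, pv_take_takeWhile]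
    · have hdig' : ¬ (PySem.Str.strIsdigit (String.ofList (t.take (w - s))) = true) := by
        rw [pv_strIsdigit_iff]
        rintro ⟨-, hall⟩
        rw [pv_all_take_iff] at hall
        exact hc hall
      rw [if_neg hdig']
      have hsucc := pv_clampIdx_succ cs.length index
      have hgt' : index < e - 1 := by
        by_contra hle
        have he : e = index + 1 := by omega
        rw [he] at hw
        omega
      have hpred := pv_clampIdx_pred cs.length e
      exact ih (e-1) (by omega) hgt' (by omega)

-- string[a:] for a nonnegative start as a drop on the character list
theorem pv_slice_from (string : String) (a : Int) :
    (PySem.Str.slice string (some a) none).toList =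
      string.toList.drop (PySem.List.clampIdx string.toList.length a) := by
  simp [PySem.Str.slice, PySem.List.slice]

-- B computed as the digit-run at the normalized start position
theorem pvB_eq_run (string : String) (index : Int) :
    get_contiguous_number_alt string index =
      String.ofList (((string.toList).drop (PySem.List.clampIdx string.toList.length index)).takeWhile
        PySem.Chars.isdigit) := by
  show String.ofList (pvBLoop []
      (PySem.Str.slice string (some (if 0 ≤ index then index
        else max 0 (PySem.Str.len string + index))) none).toList) = _
  rw [pvBLoop_eq, List.nil_append, pv_slice_from]
  congr 3
  have hlen : PySem.Str.len string = (string.toList.length : Int) := rfl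
  rw [hlen]
  unfold PySem.List.clampIdx
  split_ifs <;> omega

-- ===== VERDICT (by name: the statement is the Claim_ definition above) =====
theorem get_contiguous_number_spec : Claim_equal_get_contiguous_number := by
  intro string index _dom
  unfold Spec_get_contiguous_number
  rw [pvB_eq_run]
  by_cases hzero : (((string.toList).drop (PySem.List.clampIdx string.toList.length index)).takeWhile
      PySem.Chars.isdigit).length = 0
  · have hA : get_contiguous_number string index = "" := by
      unfold get_contiguous_number
      exact pvALoop_empty string index hzero _ _
    rw [hA, List.eq_nil_iff_length_eq_zero.mpr hzero]
  · have hk : 1 ≤ (((string.toList).drop (PySem.List.clampIdx string.toList.length index)).takeWhile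
        PySem.Chars.isdigit).length := by omega
    have hkt := (List.takeWhile_prefix (l := (string.toList).drop
        (PySem.List.clampIdx string.toList.length index)) PySem.Chars.isdigit).length_le
    have hdrop : ((string.toList).drop (PySem.List.clampIdx string.toList.length index)).length =
        string.toList.length - PySem.List.clampIdx string.toList.length index :=
      List.length_drop
    have hsle := pv_clampIdx_le string.toList.length index
    have hgt : index < (string.toList.length : Int) := by
      by_contra hle
      have h1 : PySem.List.clampIdx string.toList.length index = string.toList.length :=
        pv_clampIdx_of_ge _ _ (by omega)
      omega
    have hcov : PySem.List.clampIdx string.toList.length index +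
        (((string.toList).drop (PySem.List.clampIdx string.toList.length index)).takeWhile
            PySem.Chars.isdigit).length ≤
        PySem.List.clampIdx string.toList.length ((string.toList.length : Int)) := by
      rw [pv_clampIdx_natCast]
      omega
    show pvALoop string index (((string.toList.length : Int)) - index).toNat
        ((string.toList.length : Int)) = _
    exact pvALoop_run string index hk _ _ rfl hgt hcov
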